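-- pv_equiv track=rewrite | github.com/xikaichen/server_code | app/services/report_analysis.py | sector_indices
-- ===== SOURCE A (Python) =====
-- def sector_indices(n_angles, n_sectors):
--     per = n_angles // n_sectors
--     idx = []
--     start = 0
--     for s in range(n_sectors):
--         end = start + per if s < n_sectors-1 else n_angles
--         idx.append((start, end))
--         start = end
--     return idx
-- ===== SOURCE B (Python) =====
-- def sector_indices(n_angles, n_sectors):
--     per = n_angles // n_sectors
--     bounds = [s * per for s in range(n_sectors)] + [n_angles]
--     return list(zip(bounds, bounds[1:]))
-- ===== Notes on version B (the rewrite author's own statement) =====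
-- stated objective: simpler
-- what changed: Replaces the stateful loop accumulating `start` with a boundaries list (all cut points computed independently) paired up by zip; no running accumulator and no per-iteration branch.
import Mathlib
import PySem

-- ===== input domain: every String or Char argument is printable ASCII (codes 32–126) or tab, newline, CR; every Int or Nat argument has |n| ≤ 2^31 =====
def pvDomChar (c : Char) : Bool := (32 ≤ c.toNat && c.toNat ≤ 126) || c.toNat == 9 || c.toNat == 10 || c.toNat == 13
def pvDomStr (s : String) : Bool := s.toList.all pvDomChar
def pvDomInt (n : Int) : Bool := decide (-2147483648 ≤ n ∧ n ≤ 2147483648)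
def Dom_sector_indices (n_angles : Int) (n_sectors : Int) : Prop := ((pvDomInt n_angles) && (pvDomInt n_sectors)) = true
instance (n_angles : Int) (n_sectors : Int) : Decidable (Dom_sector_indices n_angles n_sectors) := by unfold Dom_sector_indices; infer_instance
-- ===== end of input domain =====

-- B builds the list of cut points once and pairs adjacent boundaries with zip, instead of
-- A's loop accumulating a running `start` (objective: simpler decomposition, same cost).

-- ===== PORT A =====
def sector_indices (n_angles : Int) (n_sectors : Int) : List (Int × Int) :=
  let per := PySem.Int.floordiv n_angles n_sectors
  let r := (PySem.List.pyRange 0 n_sectors 1).foldl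
    (fun (st : List (Int × Int) × Int) s =>
      let e := if s < n_sectors - 1 then st.2 + per else n_angles
      (st.1 ++ [(st.2, e)], e)) ([], 0)
  r.1

-- ===== PORT B =====
def sector_indices_alt (n_angles : Int) (n_sectors : Int) : List (Int × Int) :=
  let per := PySem.Int.floordiv n_angles n_sectors
  let bounds := (PySem.List.pyRange 0 n_sectors 1).map (fun s => s * per) ++ [n_angles]
  bounds.zip bounds.tail

-- ===== PRECONDITION & SPEC =====
-- Both A and B raise ZeroDivisionError at n_sectors = 0 (the very first statement divides); excluded.
def Pre_sector_indices (n_angles : Int) (n_sectors : Int) : Prop := n_sectors ≠ 0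
instance (n_angles : Int) (n_sectors : Int) : Decidable (Pre_sector_indices n_angles n_sectors) := by unfold Pre_sector_indices; infer_instance
def pvWitness_sector_indices : Int × Int := (10, 3)

def Spec_sector_indices (n_angles : Int) (n_sectors : Int) (out : List (Int × Int)) : Prop := out = sector_indices_alt n_angles n_sectors
instance (n_angles : Int) (n_sectors : Int) (out : List (Int × Int)) : Decidable (Spec_sector_indices n_angles n_sectors out) := by unfold Spec_sector_indices; infer_instance

-- ===== CLAIM (what is proved, stated in full; the proofs are below) =====
def Claim_equal_sector_indices : Prop := ∀ (n_angles : Int) (n_sectors : Int), Dom_sector_indices n_angles n_sectors → Pre_sector_indices n_angles n_sectors → Spec_sector_indices n_angles n_sectors (sector_indices n_angles n_sectors)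

-- ===== LEMMAS AND PROOFS =====

-- A's loop, rewritten as structural recursion over the remaining range (proof helper only).
def gA (nA nS per : Int) : List Int → Int → List (Int × Int)
  | [], _ => []
  | s :: rest, start =>
    let e := if s < nS - 1 then start + per else nA
    (start, e) :: gA nA nS per rest e

-- B's zip, started from an arbitrary first sector a (proof helper only).
def zbB (nA nS per a : Int) : List (Int × Int) :=
  let bounds := (PySem.List.pyRange a nS 1).map (fun s => s * per) ++ [nA]
  bounds.zip bounds.tail

theorem foldA_eq_gA (nA nS per : Int) (l : List Int) (acc : List (Int × Int)) (start : Int) :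
    (l.foldl (fun (st : List (Int × Int) × Int) s =>
      let e := if s < nS - 1 then st.2 + per else nA
      (st.1 ++ [(st.2, e)], e)) (acc, start)).1 = acc ++ gA nA nS per l start := by
  induction l generalizing acc start with
  | nil => simp [gA]
  | cons s rest ih =>
    simp only [List.foldl, gA, ih, List.append_assoc, List.singleton_append]

theorem gA_eq_zbB (nA nS per : Int) (m : Nat) : ∀ a : Int, (nS - a).toNat = m →
    gA nA nS per (PySem.List.pyRange a nS 1) (a * per) = zbB nA nS per a := by
  induction m with
  | zero =>
    intro a ha
    have h : nS ≤ a := by omega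
    have he : PySem.List.pyRange a nS 1 = [] := by
      simp [PySem.List.pyRange_one, (by omega : (nS - a).toNat = 0)]
    simp [he, gA, zbB]
  | succ m ih =>
    intro a ha
    have hlt : a < nS := by omega
    have hc : PySem.List.pyRange a nS 1 = a :: PySem.List.pyRange (a + 1) nS 1 :=
      PySem.List.pyRange_one_cons hlt
    by_cases hlast : a < nS - 1
    · -- not the last sector: the new start is (a+1)*per
      have hc' : PySem.List.pyRange (a + 1) nS 1 = (a + 1) :: PySem.List.pyRange (a + 1 + 1) nS 1 :=
        PySem.List.pyRange_one_cons (by omega)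
      have ih' := ih (a + 1) (by omega)
      rw [hc]
      simp only [gA, if_pos hlast]
      have hstep : a * per + per = (a + 1) * per := by ring
      rw [hstep, ih']
      simp only [zbB, hc, hc', List.map_cons, List.cons_append, List.tail_cons, List.zip_cons_cons]
    · -- last sector: a = nS - 1, both continuations are empty
      have haeq : a = nS - 1 := by omega
      have he : PySem.List.pyRange (a + 1) nS 1 = [] := by
        simp [PySem.List.pyRange_one, (by omega : (nS - (a + 1)).toNat = 0)]
      rw [hc, he]
      simp [gA, if_neg hlast, zbB, hc, he]

-- ===== VERDICT (by name: the statement is the Claim_ definition above) =====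
theorem sector_indices_spec : Claim_equal_sector_indices := by
  intro nA nS _ hpre
  unfold Spec_sector_indices sector_indices sector_indices_alt
  have h1 := foldA_eq_gA nA nS (PySem.Int.floordiv nA nS) (PySem.List.pyRange 0 nS 1) [] 0
  have h2 := gA_eq_zbB nA nS (PySem.Int.floordiv nA nS) (nS - 0).toNat 0 rfl
  simp only [zero_mul] at h2
  simp only [List.nil_append] at h1
  rw [h1, h2]
  rfl
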